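-- pv_equiv track=rewrite | github.com/davidarizaldi/Go-Agent-Simple | go.py | count_empty_areas
-- ===== SOURCE A (Python) =====
-- def count_empty_areas(board, player):
--     size = len(board)
--     visited = set()
--     score = 0
--
--     def dfs(x, y):
--         """Depth-first search to explore empty areas and check if they are surrounded."""
--         if x < 0 or x >= size or y < 0 or y >= size or (x, y) in visited:
--             return True  # Out of bounds or already visited
--         if board[x][y] == '.':
--             visited.add((x, y))
--             surrounded = True
--             for dx, dy in [(-1, 0), (1, 0), (0, -1), (0, 1)]:
--                 if not dfs(x + dx, y + dy):
--                     surrounded = False  # If we hit a boundary or an opponent stone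
--             return surrounded  # Return if the area is still surrounded
--         else:
--             # If we encounter a stone that is not the player's, it's not surrounded
--             return board[x][y] == player
--
--     # Iterate through the board to find empty spaces
--     for x in range(size):
--         for y in range(size):
--             if board[x][y] == '.' and (x, y) not in visited:
--                 # Start DFS to determine if this area is surrounded
--                 if dfs(x, y):
--                     score += 1  # Count this area as a point if it's surrounded
--
--     return score
-- ===== SOURCE B (Python) =====
-- def count_empty_areas(board, player):
--     size = len(board)
--     visited = set()
--     score = 0
--     for x in range(size):
--         for y in range(size):
--             if board[x][y] == '.' and (x, y) not in visited:
--                 surrounded = True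
--                 stack = [(x, y)]
--                 while stack:
--                     cx, cy = stack.pop()
--                     if cx < 0 or cx >= size or cy < 0 or cy >= size:
--                         continue  # off-board edges never break the surrounding
--                     if (cx, cy) in visited:
--                         continue
--                     cell = board[cx][cy]
--                     if cell == '.':
--                         visited.add((cx, cy))
--                         stack.extend(((cx, cy + 1), (cx, cy - 1), (cx + 1, cy), (cx - 1, cy)))
--                     elif cell != player:
--                         surrounded = False
--                 if surrounded:
--                     score += 1
--     return score
-- ===== Notes on version B (the rewrite author's own statement) =====
-- stated objective: alternative
-- what changed: A's recursive boolean-returning DFS (four recursive calls per cell, surrounded-flag computed as an AND over the call tree) is replaced by an iterative flood fill with an explicit stack and a single surrounded flag per region, which also avoids Python's recursion limit on large empty regions.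
import Mathlib
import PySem

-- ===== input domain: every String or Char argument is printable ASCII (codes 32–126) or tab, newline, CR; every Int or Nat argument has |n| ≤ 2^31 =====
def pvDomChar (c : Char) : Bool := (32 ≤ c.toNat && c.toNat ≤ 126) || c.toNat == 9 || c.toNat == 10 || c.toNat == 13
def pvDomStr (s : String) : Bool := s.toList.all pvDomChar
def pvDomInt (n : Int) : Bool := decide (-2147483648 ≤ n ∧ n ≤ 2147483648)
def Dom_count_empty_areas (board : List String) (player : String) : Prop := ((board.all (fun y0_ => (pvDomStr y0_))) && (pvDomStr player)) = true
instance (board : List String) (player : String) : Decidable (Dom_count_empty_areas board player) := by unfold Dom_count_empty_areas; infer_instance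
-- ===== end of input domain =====

-- B replaces A's recursive boolean-returning DFS by an explicit-stack flood fill with a
-- single `surrounded` flag (alternative decomposition; also immune to recursion limits).

-- ===== PORT A =====
-- board[x][y] as a Char; inside both ports it is only consulted when 0 ≤ x < len(board)
-- and 0 ≤ y < len(board), where Python raises only on rows shorter than the board
-- (excluded by Pre_); the ' ' default is never the result of an admitted access.
def pvCell (board : List String) (x y : Int) : Char :=
  match PySem.List.pyGet? board x with
  | some row => (PySem.Str.pyGet? row y).getD ' '
  | none => ' '

-- `x < 0 or x >= size or y < 0 or y >= size`
def pvOOB (size x y : Int) : Bool :=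
  decide (x < 0) || decide (size ≤ x) || decide (y < 0) || decide (size ≤ y)

-- A's recursive dfs; the fuel only makes the recursion structural and is chosen large
-- enough (board.length² + 1 at the call site) that it never runs out: the recursion
-- depth is bounded by the number of in-bounds cells, each level marking a new one.
def pvDfsA (board : List String) (player : String) (size : Int) :
    Nat → Int → Int → PySem.Set (Int × Int) → Bool × PySem.Set (Int × Int)
  | 0, _, _, V => (true, V)
  | f + 1, x, y, V =>
    if pvOOB size x y || PySem.Set.contains V (x, y) then (true, V)
    else if pvCell board x y == '.' then
      [((-1 : Int), (0 : Int)), (1, 0), (0, -1), (0, 1)].foldl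
        (fun acc d =>
          let r := pvDfsA board player size f (x + d.1) (y + d.2) acc.2
          (if r.1 then acc.1 else false, r.2))
        (true, PySem.Set.add V (x, y))
    else (String.singleton (pvCell board x y) == player, V)

def count_empty_areas (board : List String) (player : String) : Int :=
  let size : Int := (board.length : Int)
  let fuel : Nat := board.length * board.length + 1
  ((PySem.List.pyRange 0 size 1).foldl (fun st x =>
      (PySem.List.pyRange 0 size 1).foldl (fun st y =>
        if pvCell board x y == '.' && !(PySem.Set.contains st.2 (x, y)) then
          let r := pvDfsA board player size fuel x y st.2
          (if r.1 then st.1 + 1 else st.1, r.2)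
        else st) st)
    ((0 : Int), (PySem.Set.empty : PySem.Set (Int × Int)))).1

-- ===== PORT B =====
-- B's `while stack` loop; one fuel unit per pop, 4·board.length² + 2 at the call site
-- never runs out (each pop either shrinks the stack or marks a new in-bounds cell).
def pvRunB (board : List String) (player : String) (size : Int) :
    Nat → List (Int × Int) → PySem.Set (Int × Int) → Bool → PySem.Set (Int × Int) × Bool
  | 0, _, V, flag => (V, flag)
  | _ + 1, [], V, flag => (V, flag)
  | f + 1, c :: rest, V, flag =>
    if pvOOB size c.1 c.2 then pvRunB board player size f rest V flag
    else if PySem.Set.contains V c then pvRunB board player size f rest V flag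
    else if pvCell board c.1 c.2 == '.' then
      pvRunB board player size f
        ((c.1 - 1, c.2) :: (c.1 + 1, c.2) :: (c.1, c.2 - 1) :: (c.1, c.2 + 1) :: rest)
        (PySem.Set.add V c) flag
    else if String.singleton (pvCell board c.1 c.2) == player then
      pvRunB board player size f rest V flag
    else pvRunB board player size f rest V false

def count_empty_areas_alt (board : List String) (player : String) : Int :=
  let size : Int := (board.length : Int)
  let fuel : Nat := 4 * (board.length * board.length) + 2
  ((PySem.List.pyRange 0 size 1).foldl (fun st x =>
      (PySem.List.pyRange 0 size 1).foldl (fun st y =>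
        if pvCell board x y == '.' && !(PySem.Set.contains st.2 (x, y)) then
          let r := pvRunB board player size fuel [(x, y)] st.2 true
          (if r.2 then st.1 + 1 else st.1, r.1)
        else st) st)
    ((0 : Int), (PySem.Set.empty : PySem.Set (Int × Int)))).1

-- ===== PRECONDITION & SPEC =====
-- Pre_ excludes exactly the boards with a row shorter than the number of rows, on which
-- the scan `board[x][y]` raises IndexError in Python (both in A and in B).
def Pre_count_empty_areas (board : List String) (player : String) : Prop :=
  ∀ s ∈ board, board.length ≤ s.toList.length
instance (board : List String) (player : String) : Decidable (Pre_count_empty_areas board player) := by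
  unfold Pre_count_empty_areas; infer_instance

def pvWitness_count_empty_areas : List String × String := ([".#", "#."], "#")

def Spec_count_empty_areas (board : List String) (player : String) (out : Int) : Prop := out = count_empty_areas_alt board player
instance (board : List String) (player : String) (out : Int) : Decidable (Spec_count_empty_areas board player out) := by unfold Spec_count_empty_areas; infer_instance

-- ===== CLAIM (what is proved, stated in full; the proofs are below) =====
def Claim_equal_count_empty_areas : Prop := ∀ (board : List String) (player : String), Dom_count_empty_areas board player → Pre_count_empty_areas board player → Spec_count_empty_areas board player (count_empty_areas board player)

-- ===== LEMMAS AND PROOFS =====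

lemma pv_filter_le {α : Type} (l : List α) (p q : α → Bool)
    (h : ∀ a, q a = true → p a = true) :
    (l.filter q).length ≤ (l.filter p).length := by
  induction l with
  | nil => simp
  | cons a t ih =>
    simp only [List.filter_cons]
    by_cases hq : q a = true
    · simp [hq, h a hq]; omega
    · rw [Bool.not_eq_true] at hq
      simp only [hq, Bool.false_eq_true, if_false]
      split
      · simp only [List.length_cons]; omega
      · exact ih

lemma pv_filter_lt {α : Type} (l : List α) (p q : α → Bool)
    (h : ∀ a, q a = true → p a = true) (c : α) (hc : c ∈ l) (hp : p c = true) (hq : q c = false) :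
    (l.filter q).length < (l.filter p).length := by
  induction l with
  | nil => simp at hc
  | cons a t ih =>
    rcases List.mem_cons.1 hc with rfl | hmem
    · simp only [List.filter_cons, hp, hq, if_true, Bool.false_eq_true, if_false,
        List.length_cons]
      have := pv_filter_le t p q h
      omega
    · simp only [List.filter_cons]
      have := ih hmem
      by_cases hqa : q a = true
      · simp [hqa, h a hqa]; omega
      · rw [Bool.not_eq_true] at hqa
        simp only [hqa, Bool.false_eq_true, if_false]
        split
        · simp only [List.length_cons]; omega
        · exact this

def pvAll (n : Nat) : List (Int × Int) :=
  (List.range n).flatMap (fun i => (List.range n).map (fun j => ((i : Int), (j : Int))))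

def pvMu (n : Nat) (V : PySem.Set (Int × Int)) : Nat :=
  ((pvAll n).filter (fun c => !(PySem.Set.contains V c))).length

lemma pv_mem_pvAll (n : Nat) (x y : Int) (h : pvOOB (n : Int) x y = false) : (x, y) ∈ pvAll n := by
  simp only [pvOOB, Bool.or_eq_false_iff, decide_eq_false_iff_not, not_lt, not_le] at h
  obtain ⟨⟨⟨hx0, hxn⟩, hy0⟩, hyn⟩ := h
  simp [pvAll]
  refine ⟨⟨x.toNat, ?_, ?_⟩, y.toNat, ?_, ?_⟩ <;> omega

lemma pv_mu_le (n : Nat) (V : PySem.Set (Int × Int)) : pvMu n V ≤ n * n := by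
  have h1 := List.length_filter_le (fun c => !(PySem.Set.contains V c)) (pvAll n)
  have h2 : (pvAll n).length = n * n := by
    simp [pvAll, List.length_flatMap]
  simpa [pvMu, h2] using h1

lemma pv_mu_mono_of_contains (n : Nat) (V W : PySem.Set (Int × Int))
    (h : ∀ c, PySem.Set.contains V c = true → PySem.Set.contains W c = true) :
    pvMu n W ≤ pvMu n V := by
  apply pv_filter_le
  intro a ha
  by_cases hVa : PySem.Set.contains V a = true
  · rw [h a hVa] at ha; simp at ha
  · show (!PySem.Set.contains V a) = true
    rw [Bool.not_eq_true] at hVa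
    rw [hVa]; rfl

lemma pv_mu_add_lt (n : Nat) (V : PySem.Set (Int × Int)) (x y : Int)
    (hb : pvOOB (n : Int) x y = false) (hv : PySem.Set.contains V (x, y) = false) :
    pvMu n (PySem.Set.add V (x, y)) < pvMu n V := by
  apply pv_filter_lt _ _ _ _ (x, y) (pv_mem_pvAll n x y hb)
  · show (!PySem.Set.contains V (x, y)) = true
    rw [hv]; rfl
  · have hc : PySem.Set.contains (PySem.Set.add V (x, y)) (x, y) = true := by
      rw [PySem.Set.contains_iff, PySem.Set.mem_add]; right; rfl
    show (!PySem.Set.contains (PySem.Set.add V (x, y)) (x, y)) = false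
    rw [hc]; rfl
  · intro a ha
    by_cases hVa : PySem.Set.contains V a = true
    · have hc : PySem.Set.contains (PySem.Set.add V (x, y)) a = true := by
        rw [PySem.Set.contains_iff, PySem.Set.mem_add]
        left; exact (PySem.Set.contains_iff V a).mp hVa
      rw [hc] at ha; simp at ha
    · show (!PySem.Set.contains V a) = true
      rw [Bool.not_eq_true] at hVa
      rw [hVa]; rfl

lemma pv_dfs_succ (board : List String) (player : String) (size : Int) (f : Nat) (x y : Int)
    (V : PySem.Set (Int × Int)) :
    pvDfsA board player size (f + 1) x y V =
      if pvOOB size x y || PySem.Set.contains V (x, y) then (true, V)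
      else if pvCell board x y == '.' then
        let r1 := pvDfsA board player size f (x - 1) y (PySem.Set.add V (x, y))
        let r2 := pvDfsA board player size f (x + 1) y r1.2
        let r3 := pvDfsA board player size f x (y - 1) r2.2
        let r4 := pvDfsA board player size f x (y + 1) r3.2
        (if r4.1 then (if r3.1 then (if r2.1 then (if r1.1 then true else false) else false) else false) else false, r4.2)
      else (String.singleton (pvCell board x y) == player, V) := by
  show (if pvOOB size x y || PySem.Set.contains V (x, y) then (true, V)
      else if pvCell board x y == '.' then _ else (String.singleton (pvCell board x y) == player, V)) = _
  simp only [List.foldl]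
  norm_num [sub_eq_add_neg]

lemma pv_dfs_mono (board : List String) (player : String) (size : Int) :
    ∀ (f : Nat) (x y : Int) (V : PySem.Set (Int × Int)) (c : Int × Int),
      PySem.Set.contains V c = true →
      PySem.Set.contains (pvDfsA board player size f x y V).2 c = true := by
  intro f
  induction f with
  | zero => intro x y V c h; exact h
  | succ f ih =>
    intro x y V c h
    rw [pv_dfs_succ]
    split_ifs with h1 h2
    · exact h
    · dsimp only
      apply ih; apply ih; apply ih; apply ih
      rw [PySem.Set.contains_iff, PySem.Set.mem_add]
      left; exact (PySem.Set.contains_iff V c).mp h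
    · exact h

lemma pv_dfs_mu_le (board : List String) (player : String) (f : Nat) (x y : Int)
    (V : PySem.Set (Int × Int)) :
    pvMu board.length (pvDfsA board player (board.length : Int) f x y V).2 ≤ pvMu board.length V :=
  pv_mu_mono_of_contains _ _ _ (fun c hc => pv_dfs_mono board player _ f x y V c hc)

lemma pv_dfs_stable (board : List String) (player : String) :
    ∀ (k : Nat) (V : PySem.Set (Int × Int)), pvMu board.length V ≤ k →
    ∀ (f g : Nat) (x y : Int), pvMu board.length V < f → pvMu board.length V < g →
      pvDfsA board player (board.length : Int) f x y V =
      pvDfsA board player (board.length : Int) g x y V := by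
  intro k
  induction k using Nat.strong_induction_on with
  | _ k ih =>
    intro V hVk f g x y hf hg
    obtain ⟨f', rfl⟩ : ∃ f', f = f' + 1 := ⟨f - 1, by omega⟩
    obtain ⟨g', rfl⟩ : ∃ g', g = g' + 1 := ⟨g - 1, by omega⟩
    rw [pv_dfs_succ, pv_dfs_succ]
    split_ifs with h1 h2
    · rfl
    · simp only [Bool.or_eq_true, not_or, Bool.not_eq_true] at h1
      obtain ⟨hb, hv⟩ := h1
      dsimp only
      set V1 := PySem.Set.add V (x, y) with hV1
      have hμ1 : pvMu board.length V1 < pvMu board.length V :=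
        pv_mu_add_lt board.length V x y hb hv
      have e1 : pvDfsA board player (board.length : Int) f' (x - 1) y V1 =
          pvDfsA board player (board.length : Int) g' (x - 1) y V1 :=
        ih (pvMu board.length V1) (by omega) V1 le_rfl f' g' _ _ (by omega) (by omega)
      rw [e1]
      set V2 := (pvDfsA board player (board.length : Int) g' (x - 1) y V1).2 with hV2
      have hμ2 : pvMu board.length V2 ≤ pvMu board.length V1 := pv_dfs_mu_le _ _ _ _ _ _
      have e2 : pvDfsA board player (board.length : Int) f' (x + 1) y V2 =
          pvDfsA board player (board.length : Int) g' (x + 1) y V2 :=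
        ih (pvMu board.length V1) (by omega) V2 hμ2 f' g' _ _ (by omega) (by omega)
      rw [e2]
      set V3 := (pvDfsA board player (board.length : Int) g' (x + 1) y V2).2 with hV3
      have hμ3 : pvMu board.length V3 ≤ pvMu board.length V2 := pv_dfs_mu_le _ _ _ _ _ _
      have e3 : pvDfsA board player (board.length : Int) f' x (y - 1) V3 =
          pvDfsA board player (board.length : Int) g' x (y - 1) V3 :=
        ih (pvMu board.length V1) (by omega) V3 (by omega) f' g' _ _ (by omega) (by omega)
      rw [e3]
      set V4 := (pvDfsA board player (board.length : Int) g' x (y - 1) V3).2 with hV4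
      have hμ4 : pvMu board.length V4 ≤ pvMu board.length V3 := pv_dfs_mu_le _ _ _ _ _ _
      have e4 : pvDfsA board player (board.length : Int) f' x (y + 1) V4 =
          pvDfsA board player (board.length : Int) g' x (y + 1) V4 :=
        ih (pvMu board.length V1) (by omega) V4 (by omega) f' g' _ _ (by omega) (by omega)
      rw [e4]
    · rfl

lemma pv_run_succ (board : List String) (player : String) (size : Int) (f : Nat)
    (c : Int × Int) (rest : List (Int × Int)) (V : PySem.Set (Int × Int)) (flag : Bool) :
    pvRunB board player size (f + 1) (c :: rest) V flag =
      if pvOOB size c.1 c.2 then pvRunB board player size f rest V flag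
      else if PySem.Set.contains V c then pvRunB board player size f rest V flag
      else if pvCell board c.1 c.2 == '.' then
        pvRunB board player size f
          ((c.1 - 1, c.2) :: (c.1 + 1, c.2) :: (c.1, c.2 - 1) :: (c.1, c.2 + 1) :: rest)
          (PySem.Set.add V c) flag
      else if String.singleton (pvCell board c.1 c.2) == player then
        pvRunB board player size f rest V flag
      else pvRunB board player size f rest V false := rfl

lemma pv_run_stable (board : List String) (player : String) :
    ∀ (k : Nat) (stack : List (Int × Int)) (V : PySem.Set (Int × Int)),
      stack.length + 4 * pvMu board.length V ≤ k →
    ∀ (f g : Nat) (flag : Bool),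
      stack.length + 4 * pvMu board.length V < f →
      stack.length + 4 * pvMu board.length V < g →
      pvRunB board player (board.length : Int) f stack V flag =
      pvRunB board player (board.length : Int) g stack V flag := by
  intro k
  induction k using Nat.strong_induction_on with
  | _ k ih =>
    intro stack V hk f g flag hf hg
    obtain ⟨f', rfl⟩ : ∃ f', f = f' + 1 := ⟨f - 1, by omega⟩
    obtain ⟨g', rfl⟩ : ∃ g', g = g' + 1 := ⟨g - 1, by omega⟩
    match stack with
    | [] => rfl
    | c :: rest =>
      obtain ⟨cx, cy⟩ := c
      rw [pv_run_succ, pv_run_succ]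
      simp only [List.length_cons] at hk hf hg
      split_ifs with hb hv hdot hp
      · exact ih (rest.length + 4 * pvMu board.length V) (by omega) rest V le_rfl f' g' flag (by omega) (by omega)
      · exact ih (rest.length + 4 * pvMu board.length V) (by omega) rest V le_rfl f' g' flag (by omega) (by omega)
      · rw [Bool.not_eq_true] at hb hv
        have hμ1 : pvMu board.length (PySem.Set.add V (cx, cy)) < pvMu board.length V :=
          pv_mu_add_lt board.length V cx cy hb hv
        exact ih ((rest.length + 4) + 4 * pvMu board.length (PySem.Set.add V (cx, cy)))
          (by omega) _ _ (by simp only [List.length_cons]; omega) f' g' flag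
          (by simp only [List.length_cons]; omega) (by simp only [List.length_cons]; omega)
      · exact ih (rest.length + 4 * pvMu board.length V) (by omega) rest V le_rfl f' g' flag (by omega) (by omega)
      · exact ih (rest.length + 4 * pvMu board.length V) (by omega) rest V le_rfl f' g' false (by omega) (by omega)

def pvDfsI (board : List String) (player : String) (x y : Int) (V : PySem.Set (Int × Int)) :
    Bool × PySem.Set (Int × Int) :=
  pvDfsA board player (board.length : Int) (pvMu board.length V + 1) x y V

def pvRunI (board : List String) (player : String) (stack : List (Int × Int))
    (V : PySem.Set (Int × Int)) (flag : Bool) : PySem.Set (Int × Int) × Bool :=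
  pvRunB board player (board.length : Int) (stack.length + 4 * pvMu board.length V + 1) stack V flag

lemma pv_sim (board : List String) (player : String) :
    ∀ (k : Nat) (V : PySem.Set (Int × Int)), pvMu board.length V ≤ k →
    ∀ (x y : Int) (rest : List (Int × Int)) (flag : Bool),
      pvRunI board player ((x, y) :: rest) V flag =
      pvRunI board player rest (pvDfsI board player x y V).2
        (flag && (pvDfsI board player x y V).1) := by
  intro k
  induction k using Nat.strong_induction_on with
  | _ k ih =>
    intro V hVk x y rest flag
    have hlen : ((x, y) :: rest).length + 4 * pvMu board.length V + 1 =
        (rest.length + 4 * pvMu board.length V + 1) + 1 := by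
      simp only [List.length_cons]; omega
    rw [pvRunI, hlen, pv_run_succ]
    rw [pvDfsI, pv_dfs_succ]
    by_cases hb : pvOOB (board.length : Int) x y = true
    · simp only [hb, Bool.true_or, if_pos]
      rw [show pvRunI board player rest V (flag && true) = pvRunI board player rest V flag by
        rw [Bool.and_true]]
      rfl
    · rw [Bool.not_eq_true] at hb
      by_cases hv : PySem.Set.contains V (x, y) = true
      · simp only [hb, hv, Bool.false_or, if_pos, Bool.and_true]
        rfl
      · rw [Bool.not_eq_true] at hv
        simp only [hb, hv, Bool.false_or, Bool.false_eq_true, if_false]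
        by_cases hdot : (pvCell board x y == '.') = true
        · simp only [hdot, if_true]
          show pvRunB board player (board.length : Int) (rest.length + 4 * pvMu board.length V + 1) ((x - 1, y) :: (x + 1, y) :: (x, y - 1) :: (x, y + 1) :: rest) (PySem.Set.add V (x, y)) flag = _
          have hμ1 : pvMu board.length (PySem.Set.add V (x, y)) < pvMu board.length V :=
            pv_mu_add_lt board.length V x y hb hv
          set V1 := PySem.Set.add V (x, y) with hV1def
          set S4 := ((x - 1, y) :: (x + 1, y) :: (x, y - 1) :: (x, y + 1) :: rest :
            List (Int × Int)) with hS4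
          have hrun : pvRunB board player (board.length : Int)
              (rest.length + 4 * pvMu board.length V + 1) S4 V1 flag =
              pvRunI board player S4 V1 flag := by
            rw [pvRunI]
            exact pv_run_stable board player (S4.length + 4 * pvMu board.length V1) S4 V1
              le_rfl _ _ flag (by simp only [hS4, List.length_cons]; omega) (by omega)
          rw [hrun]
          have hb1 := ih (pvMu board.length V1) (by omega) V1 le_rfl (x - 1) y
            ((x + 1, y) :: (x, y - 1) :: (x, y + 1) :: rest) flag
          rw [hS4, hb1]
          set r1 := pvDfsI board player (x - 1) y V1 with hr1
          have hμ2 : pvMu board.length r1.2 ≤ pvMu board.length V1 := by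
            rw [hr1, pvDfsI]; exact pv_dfs_mu_le _ _ _ _ _ _
          have hb2 := ih (pvMu board.length V1) (by omega) r1.2 hμ2 (x + 1) y
            ((x, y - 1) :: (x, y + 1) :: rest) (flag && r1.1)
          rw [hb2]
          set r2 := pvDfsI board player (x + 1) y r1.2 with hr2
          have hμ3 : pvMu board.length r2.2 ≤ pvMu board.length r1.2 := by
            rw [hr2, pvDfsI]; exact pv_dfs_mu_le _ _ _ _ _ _
          have hb3 := ih (pvMu board.length V1) (by omega) r2.2 (by omega) x (y - 1)
            ((x, y + 1) :: rest) ((flag && r1.1) && r2.1)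
          rw [hb3]
          set r3 := pvDfsI board player x (y - 1) r2.2 with hr3
          have hμ4 : pvMu board.length r3.2 ≤ pvMu board.length r2.2 := by
            rw [hr3, pvDfsI]; exact pv_dfs_mu_le _ _ _ _ _ _
          have hb4 := ih (pvMu board.length V1) (by omega) r3.2 (by omega) x (y + 1)
            rest (((flag && r1.1) && r2.1) && r3.1)
          rw [hb4]
          set r4 := pvDfsI board player x (y + 1) r3.2 with hr4
          -- now identify the fueled dfs calls on the RHS with the canonical ones
          have e1 : pvDfsA board player (board.length : Int) (pvMu board.length V) (x - 1) y V1 = r1 := by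
            rw [hr1, pvDfsI]
            exact pv_dfs_stable board player (pvMu board.length V1) V1 le_rfl _ _ _ _
              (by omega) (by omega)
          rw [e1]
          have e2 : pvDfsA board player (board.length : Int) (pvMu board.length V) (x + 1) y r1.2 = r2 := by
            rw [hr2, pvDfsI]
            exact pv_dfs_stable board player (pvMu board.length V1) r1.2 hμ2 _ _ _ _
              (by omega) (by omega)
          rw [e2]
          have e3 : pvDfsA board player (board.length : Int) (pvMu board.length V) x (y - 1) r2.2 = r3 := by
            rw [hr3, pvDfsI]
            exact pv_dfs_stable board player (pvMu board.length V1) r2.2 (by omega) _ _ _ _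
              (by omega) (by omega)
          rw [e3]
          have e4 : pvDfsA board player (board.length : Int) (pvMu board.length V) x (y + 1) r3.2 = r4 := by
            rw [hr4, pvDfsI]
            exact pv_dfs_stable board player (pvMu board.length V1) r3.2 (by omega) _ _ _ _
              (by omega) (by omega)
          rw [e4]
          congr 1
          generalize r1.1 = b1
          generalize r2.1 = b2
          generalize r3.1 = b3
          generalize r4.1 = b4
          cases b1 <;> cases b2 <;> cases b3 <;> cases b4 <;> cases flag <;> rfl

        · rw [Bool.not_eq_true] at hdot
          simp only [hdot, Bool.false_eq_true, if_false]
          by_cases hp : (String.singleton (pvCell board x y) == player) = true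
          · simp only [hp, if_true, Bool.and_true]
            rfl
          · rw [Bool.not_eq_true] at hp
            simp only [hp, Bool.false_eq_true, if_false, Bool.and_false]
            rfl

theorem pv_main (board : List String) (player : String) :
    count_empty_areas board player = count_empty_areas_alt board player := by
  have hAcall : ∀ (V : PySem.Set (Int × Int)) (x y : Int),
      pvDfsA board player (board.length : Int) (board.length * board.length + 1) x y V =
      pvDfsI board player x y V := by
    intro V x y
    have hle := pv_mu_le board.length V
    rw [pvDfsI]
    exact pv_dfs_stable board player (pvMu board.length V) V le_rfl _ _ x y (by omega) (by omega)
  have hnil : ∀ (W : PySem.Set (Int × Int)) (fl : Bool), pvRunI board player [] W fl = (W, fl) :=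
    fun W fl => rfl
  have hBcall : ∀ (V : PySem.Set (Int × Int)) (x y : Int),
      pvRunB board player (board.length : Int) (4 * (board.length * board.length) + 2)
        [(x, y)] V true =
      ((pvDfsI board player x y V).2, (pvDfsI board player x y V).1) := by
    intro V x y
    have hle := pv_mu_le board.length V
    have h1 : pvRunB board player (board.length : Int) (4 * (board.length * board.length) + 2)
        [(x, y)] V true = pvRunI board player [(x, y)] V true := by
      rw [pvRunI]
      exact pv_run_stable board player ([(x, y)].length + 4 * pvMu board.length V) _ V le_rfl _ _
        true (by simp only [List.length_cons, List.length_nil]; omega) (by omega)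
    rw [h1, pv_sim board player (pvMu board.length V) V le_rfl x y [] true, hnil, Bool.true_and]
  have hfun : (fun (st : Int × PySem.Set (Int × Int)) (x : Int) =>
        (PySem.List.pyRange 0 (board.length : Int) 1).foldl (fun st y =>
          if pvCell board x y == '.' && !(PySem.Set.contains st.2 (x, y)) then
            let r := pvDfsA board player (board.length : Int)
              (board.length * board.length + 1) x y st.2
            (if r.1 then st.1 + 1 else st.1, r.2)
          else st) st)
      = (fun (st : Int × PySem.Set (Int × Int)) (x : Int) =>
        (PySem.List.pyRange 0 (board.length : Int) 1).foldl (fun st y =>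
          if pvCell board x y == '.' && !(PySem.Set.contains st.2 (x, y)) then
            let r := pvRunB board player (board.length : Int)
              (4 * (board.length * board.length) + 2) [(x, y)] st.2 true
            (if r.2 then st.1 + 1 else st.1, r.1)
          else st) st) := by
    funext st x
    congr 1
    funext st y
    by_cases hc : (pvCell board x y == '.' && !(PySem.Set.contains st.2 (x, y))) = true
    · simp only [hc, if_true]
      rw [hAcall st.2 x y, hBcall st.2 x y]
    · rw [Bool.not_eq_true] at hc
      simp only [hc, Bool.false_eq_true, if_false]
  show ((PySem.List.pyRange 0 (board.length : Int) 1).foldl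
      (fun (st : Int × PySem.Set (Int × Int)) (x : Int) =>
        (PySem.List.pyRange 0 (board.length : Int) 1).foldl (fun st y =>
          if pvCell board x y == '.' && !(PySem.Set.contains st.2 (x, y)) then
            let r := pvDfsA board player (board.length : Int)
              (board.length * board.length + 1) x y st.2
            (if r.1 then st.1 + 1 else st.1, r.2)
          else st) st)
      ((0 : Int), (PySem.Set.empty : PySem.Set (Int × Int)))).1 =
    ((PySem.List.pyRange 0 (board.length : Int) 1).foldl
      (fun (st : Int × PySem.Set (Int × Int)) (x : Int) =>
        (PySem.List.pyRange 0 (board.length : Int) 1).foldl (fun st y =>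
          if pvCell board x y == '.' && !(PySem.Set.contains st.2 (x, y)) then
            let r := pvRunB board player (board.length : Int)
              (4 * (board.length * board.length) + 2) [(x, y)] st.2 true
            (if r.2 then st.1 + 1 else st.1, r.1)
          else st) st)
      ((0 : Int), (PySem.Set.empty : PySem.Set (Int × Int)))).1
  rw [hfun]

-- ===== VERDICT (by name: the statement is the Claim_ definition above) =====
theorem count_empty_areas_spec : Claim_equal_count_empty_areas := by
  intro board player _ _
  show count_empty_areas board player = count_empty_areas_alt board player
  exact pv_main board player
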